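-- pv_equiv track=rewrite | github.com/nearmiss1193-afk/task-orchestrator-omni | scripts/run_owner_identification.py | identify_husband_wife_teams
-- ===== SOURCE A (Python) =====
-- from collections import Counter
--
-- def identify_husband_wife_teams(principals):
--     if not principals or len(principals) < 2:
--         return False
--     last_names = []
--     for p in principals:
--         name = p.get("name", "").strip().upper()
--         if not name: continue
--         parts = name.split(",")
--         if parts:
--             last_names.append(parts[0].strip())
--     counts = Counter(last_names)
--     for name, count in counts.items():
--         if count >= 2:
--             return True
--     return False
-- ===== SOURCE B (Python) =====
-- def identify_husband_wife_teams(principals):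
--     if len(principals) < 2:
--         return False
--     seen = set()
--     for p in principals:
--         name = p.get("name", "").strip().upper()
--         if not name:
--             continue
--         last = name.split(",")[0].strip()
--         if last in seen:
--             return True
--         seen.add(last)
--     return False
-- ===== Notes on version B (the rewrite author's own statement) =====
-- stated objective: simpler
-- what changed: Replaces build-a-list + Counter + scan-of-counts (three passes over the data) with a single early-exiting traversal that maintains a set of last names already seen.
import Mathlib
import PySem

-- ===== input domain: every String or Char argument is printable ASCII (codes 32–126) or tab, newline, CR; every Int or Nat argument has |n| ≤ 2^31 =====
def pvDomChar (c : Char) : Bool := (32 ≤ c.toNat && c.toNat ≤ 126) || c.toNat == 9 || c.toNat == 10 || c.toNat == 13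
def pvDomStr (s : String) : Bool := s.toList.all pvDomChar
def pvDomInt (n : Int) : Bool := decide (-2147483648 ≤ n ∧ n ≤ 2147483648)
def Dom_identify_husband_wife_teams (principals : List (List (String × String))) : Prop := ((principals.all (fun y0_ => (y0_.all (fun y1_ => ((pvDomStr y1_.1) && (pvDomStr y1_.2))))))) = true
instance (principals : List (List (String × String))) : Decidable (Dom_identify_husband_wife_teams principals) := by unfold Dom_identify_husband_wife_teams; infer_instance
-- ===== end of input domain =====

-- B replaces A's build-list + Counter + scan-of-counts with one early-exiting pass over a seen-set (objective: simpler).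


-- ===== PORT A =====
def identify_husband_wife_teams (principals : List (List (String × String))) : Bool :=
  if principals.isEmpty || decide (principals.length < 2) then false
  else
    let last_names := principals.foldl (fun acc p =>
      let name := PySem.Str.upper (PySem.Str.strip ((PySem.Dict.mk p).getD "name" ""))
      if name == "" then acc
      else
        let parts := (PySem.Str.split? name ",").getD []
        if parts.isEmpty then acc
        else acc ++ [PySem.Str.strip (PySem.List.pyGetD parts 0 "")]) []
    (PySem.Dict.counter last_names).items.any (fun kv => decide (2 ≤ kv.2))

-- ===== PORT B =====
def pvBLoop : List (List (String × String)) → PySem.Set String → Bool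
  | [], _ => false
  | p :: rest, seen =>
    let name := PySem.Str.upper (PySem.Str.strip ((PySem.Dict.mk p).getD "name" ""))
    if name == "" then pvBLoop rest seen
    else
      let last := PySem.Str.strip (PySem.List.pyGetD ((PySem.Str.split? name ",").getD []) 0 "")
      if PySem.Set.contains seen last then true
      else pvBLoop rest (PySem.Set.add seen last)

def identify_husband_wife_teams_alt (principals : List (List (String × String))) : Bool :=
  if decide (principals.length < 2) then false
  else pvBLoop principals PySem.Set.empty

-- ===== PRECONDITION & SPEC =====
def Spec_identify_husband_wife_teams (principals : List (List (String × String))) (out : Bool) : Prop := out = identify_husband_wife_teams_alt principals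
instance (principals : List (List (String × String))) (out : Bool) : Decidable (Spec_identify_husband_wife_teams principals out) := by unfold Spec_identify_husband_wife_teams; infer_instance

-- ===== CLAIM (what is proved, stated in full; the proofs are below) =====
def Claim_equal_identify_husband_wife_teams : Prop := ∀ (principals : List (List (String × String))), Dom_identify_husband_wife_teams principals → Spec_identify_husband_wife_teams principals (identify_husband_wife_teams principals)

-- ===== LEMMAS AND PROOFS =====

-- the upper-stripped "name" field of a principal
def pvName (p : List (String × String)) : String :=
  PySem.Str.upper (PySem.Str.strip ((PySem.Dict.mk p).getD "name" ""))

-- the extracted last name of a principal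
def pvLast (p : List (String × String)) : String :=
  PySem.Str.strip (PySem.List.pyGetD ((PySem.Str.split? (pvName p) ",").getD []) 0 "")

-- the list of last names both programs effectively traverse
def pvExtract (ps : List (List (String × String))) : List String :=
  ps.filterMap (fun p => if pvName p == "" then none else some (pvLast p))

lemma pv_go_ne_nil (sep : List Char) (fuel : Nat) : ∀ (l cur : List Char) (acc : List (List Char)),
    PySem.Chars.splitOn.go sep fuel l cur acc ≠ [] := by
  induction fuel with
  | zero => intro l cur acc; simp [PySem.Chars.splitOn.go]
  | succ n ih =>
    intro l cur acc
    cases l with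
    | nil => simp [PySem.Chars.splitOn.go]
    | cons c rest =>
      rw [PySem.Chars.splitOn.go]
      split
      · exact ih _ _ _
      · exact ih _ _ _

-- splitting on the nonempty separator "," never yields the empty list
lemma pv_parts_ne_nil (s : String) : ((PySem.Str.split? s ",").getD []) ≠ [] := by
  simp [PySem.Str.split?, PySem.Chars.split?, PySem.Chars.splitOn]
  intro h
  exact pv_go_ne_nil _ _ _ _ _ h

-- A's first loop builds exactly acc ++ pvExtract ps
set_option maxHeartbeats 1000000 in
lemma pvA_foldl (ps : List (List (String × String))) (acc : List String) :
    ps.foldl (fun acc p =>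
      let name := PySem.Str.upper (PySem.Str.strip ((PySem.Dict.mk p).getD "name" ""))
      if name == "" then acc
      else
        let parts := (PySem.Str.split? name ",").getD []
        if parts.isEmpty then acc
        else acc ++ [PySem.Str.strip (PySem.List.pyGetD parts 0 "")]) acc
    = acc ++ pvExtract ps := by
  induction ps generalizing acc with
  | nil => simp [pvExtract]
  | cons p ps ih =>
    rw [List.foldl_cons, ih]
    by_cases h : pvName p = ""
    · have h' := h
      simp only [pvName] at h'
      simp [pvExtract, pvName, h']
    · have h' := h
      simp only [pvName] at h'
      have hne : ((PySem.Str.split? (pvName p) ",").getD []).isEmpty = false := by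
        simp [pv_parts_ne_nil]
      simp only [pvName] at hne
      simp [pvExtract, pvLast, pvName, h', hne]

-- A's Counter scan detects exactly a duplicate in the list
lemma pvA_counter (L : List String) :
    (PySem.Dict.counter L).items.any (fun kv => decide (2 ≤ kv.2)) = decide (¬ L.Nodup) := by
  rw [PySem.Dict.items_counter, Bool.eq_iff_iff]
  simp only [List.any_eq_true, List.any_map, Function.comp_apply, decide_eq_true_eq,
    List.nodup_iff_count_le_one]
  constructor
  · rintro ⟨k, _, hk⟩ h
    have := h k
    have : (2 : Int) ≤ (List.count k L : Int) := hk
    omega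
  · intro h
    rw [not_forall] at h
    obtain ⟨a, ha⟩ := h
    refine ⟨a, ?_, by exact_mod_cast (by omega : 2 ≤ List.count a L)⟩
    rw [PySem.Set.mem_ofList]
    exact List.count_pos_iff.mp (by omega)

-- B's loop over principals is the seen-set duplicate check on the extracted names
def pvAux : List String → PySem.Set String → Bool
  | [], _ => false
  | x :: xs, s => if PySem.Set.contains s x then true else pvAux xs (PySem.Set.add s x)

lemma pvB_loop (ps : List (List (String × String))) (seen : PySem.Set String) :
    pvBLoop ps seen = pvAux (pvExtract ps) seen := by
  induction ps generalizing seen with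
  | nil => simp [pvBLoop, pvExtract, pvAux]
  | cons p ps ih =>
    have step : pvBLoop (p :: ps) seen =
        if pvName p == "" then pvBLoop ps seen
        else if PySem.Set.contains seen (pvLast p) then true
        else pvBLoop ps (PySem.Set.add seen (pvLast p)) := rfl
    rw [step]
    by_cases h : pvName p = ""
    · simp [pvExtract, h, ih]
    · by_cases hc : pvLast p ∈ seen
      · simp [pvExtract, h, hc, pvAux, PySem.Set.contains]
      · simp [pvExtract, h, hc, pvAux, ih, PySem.Set.contains]

lemma pvAux_spec (L : List String) (s : PySem.Set String) :
    pvAux L s = decide (¬ (L.Nodup ∧ ∀ x ∈ L, x ∉ s)) := by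
  induction L generalizing s with
  | nil => simp [pvAux]
  | cons x xs ih =>
    by_cases hc : x ∈ s
    · simp [pvAux, hc]
    · have hb : PySem.Set.contains s x = false := by
        simpa [PySem.Set.contains, List.contains_iff_mem] using hc
      simp only [pvAux, hb, Bool.false_eq_true, if_false, ih]
      simp only [decide_eq_decide, List.nodup_cons, List.mem_cons]
      constructor
      · rintro h ⟨⟨hx, hnd⟩, hall⟩
        exact h ⟨hnd, fun y hy hmem => by
          rcases (PySem.Set.mem_add s x y).mp hmem with h1 | h2
          · exact hall y (Or.inr hy) h1
          · exact hx (h2 ▸ hy)⟩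
      · rintro h ⟨hnd, hall⟩
        refine h ⟨⟨fun hx => hall x hx ((PySem.Set.mem_add s x x).mpr (Or.inr rfl)), hnd⟩, ?_⟩
        rintro y (rfl | hy)
        · exact hc
        · intro hys
          exact hall y hy ((PySem.Set.mem_add s x y).mpr (Or.inl hys))

-- ===== VERDICT (by name: the statement is the Claim_ definition above) =====
theorem identify_husband_wife_teams_spec : Claim_equal_identify_husband_wife_teams := by
  intro ps _
  unfold Spec_identify_husband_wife_teams identify_husband_wife_teams identify_husband_wife_teams_alt
  by_cases h : ps.length < 2
  · simp [h]
  · have hne : ps.isEmpty = false := by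
      cases ps with
      | nil => simp at h
      | cons a l => rfl
    simp only [h, hne, decide_false, Bool.or_false, Bool.false_eq_true, if_false]
    rw [pvA_foldl, pvB_loop, pvAux_spec, pvA_counter]
    simp [PySem.Set.empty]
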